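-- pv_equiv track=rewrite | github.com/DojoFatecSP/Dojos | 2018/20181004 - papel - python/papel.py | solve
-- ===== SOURCE A (Python) =====
-- def organizar_lista(jogadores,indice_jogador_inicial):
--     jogadores= jogadores[indice_jogador_inicial:] + jogadores[:indice_jogador_inicial]
--     return jogadores
--
-- def solve(q, f, a):
--     chutes = 2 * f
--     jogadores = list(range(q))
--     jogadores.reverse()
--     indice_jogador_inicial = jogadores.index(a)
--
--     while len(jogadores) != 1: # enquanto numero de jogadores não for 1
--         jogadores = organizar_lista(jogadores, indice_jogador_inicial)
--         indice_eliminado= chutes%len(jogadores)   # calcular o aluno eliminado ********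
--         jogadores.pop(indice_eliminado)
--         indice_jogador_inicial = indice_eliminado - 1
--         chutes += 2
--
--
--     # enquanto o indice do aluno inicial não for o indice final, add 1 no indice do aluno inicial. Quando chega no final,
--     # indice do aluno inicial = 0
--     # retirar o eliminado da lista
--     # iniciar o calculo do jogador inicial a partir do indice do eliminado - 1
--     # aumentar o chutes em 2
--
--
--
--
--     return jogadores[0]
-- ===== SOURCE B (Python) =====
-- def solve(q, f, a):
--     # Josephus-style back-substitution: instead of simulating the list (A rotates,
--     # pops and re-indexes a list once per elimination, O(q^2)), track only the
--     # survivor's index through circle sizes 2..q (O(q)), then read the survivor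
--     # out of the initial circle.
--     pos = 0  # survivor's index in the rotated frame of a circle of size n
--     for n in range(2, q + 1):
--         e = (2 * f + 2 * (q - n)) % n          # index eliminated at size n
--         y = (pos + e - 1) % (n - 1)            # survivor's index after the pop,
--                                                # counted from the new start e-1
--         pos = y if y < e else y + 1            # survivor's index before the pop
--     players = list(range(q - 1, -1, -1))       # the initial circle
--     start = players.index(a)                   # the game starts at player a
--     return players[(pos + start) % q]
-- ===== Notes on version B (the rewrite author's own statement) =====
-- stated objective: faster
-- what changed: Replaces the O(q^2) simulation (rotating, popping and re-indexing a Python list once per elimination) with an O(q) Josephus-style back-substitution that tracks only the survivor's index through circle sizes 2..q and maps it back to a player number with one closed-form rotation.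
import Mathlib
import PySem

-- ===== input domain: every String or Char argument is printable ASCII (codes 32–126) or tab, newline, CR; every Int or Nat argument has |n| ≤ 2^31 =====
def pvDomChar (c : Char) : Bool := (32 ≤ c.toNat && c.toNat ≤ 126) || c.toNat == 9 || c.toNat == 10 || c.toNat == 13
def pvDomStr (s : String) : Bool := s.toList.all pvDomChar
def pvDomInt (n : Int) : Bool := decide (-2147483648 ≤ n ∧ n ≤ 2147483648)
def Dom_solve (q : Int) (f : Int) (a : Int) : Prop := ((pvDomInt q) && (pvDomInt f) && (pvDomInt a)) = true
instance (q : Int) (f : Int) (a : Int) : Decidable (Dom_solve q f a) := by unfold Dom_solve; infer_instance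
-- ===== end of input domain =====

-- B replaces A's O(q^2) list simulation (rotate, pop, re-index once per elimination)
-- with a Josephus-style back-substitution tracking only the survivor's index (faster, asymptotic).


-- ===== PORT A =====
def organizar_lista (jogadores : List Int) (indice_jogador_inicial : Int) : List Int :=
  PySem.List.slice jogadores (some indice_jogador_inicial) none ++
    PySem.List.slice jogadores none (some indice_jogador_inicial)

-- rotation keeps the length (used by the loop's termination proof)
theorem organizar_lista_length (l : List Int) (s : Int) :
    (organizar_lista l s).length = l.length := by
  have h1 : PySem.List.slice l (some s) none = l.drop (PySem.List.clampIdx l.length s) :=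
    PySem.List.slice_some_none l s
  have h2 : PySem.List.slice l none (some s) = l.take (PySem.List.clampIdx l.length s) := by
    simp [PySem.List.slice]
  have := PySem.List.clampIdx_le l.length s
  simp [organizar_lista, h1, h2]

-- the while loop of A: state (jogadores, indice_jogador_inicial, chutes);
-- 'indice_eliminado' (= chutes % len) is written out at each use (let-inlining, same values)
def solveLoop (jogadores : List Int) (indice_jogador_inicial : Int) (chutes : Int) : Int :=
  if jogadores.length = 1 then
    PySem.List.pyGetD jogadores 0 0            -- return jogadores[0]
  else
    match h : PySem.List.pop? (organizar_lista jogadores indice_jogador_inicial)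
        (PySem.Int.mod chutes ((organizar_lista jogadores indice_jogador_inicial).length : Int)) with
    | some r => solveLoop r.2
        (PySem.Int.mod chutes ((organizar_lista jogadores indice_jogador_inicial).length : Int) - 1)
        (chutes + 2)
    | none => 0                                -- unreachable: the index is always in range
termination_by jogadores.length
decreasing_by
  have hlen := PySem.List.length_of_pop?_eq_some _ h
  have h2 := organizar_lista_length jogadores indice_jogador_inicial
  omega

def solve (q : Int) (f : Int) (a : Int) : Int :=
  let chutes := 2 * f
  let jogadores := (PySem.List.pyRange 0 q 1).reverse
  match PySem.List.index? jogadores a with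
  | some indice_jogador_inicial => solveLoop jogadores (indice_jogador_inicial : Int) chutes
  | none => 0                                  -- Python raises ValueError here; excluded by Pre_

-- ===== PORT B =====
def solve_alt (q : Int) (f : Int) (a : Int) : Int :=
  let pos := (PySem.List.pyRange 2 (q + 1) 1).foldl
    (fun pos n =>
      let e := PySem.Int.mod (2 * f + 2 * (q - n)) n
      let y := PySem.Int.mod (pos + e - 1) (n - 1)
      if y < e then y else y + 1) 0
  let players := PySem.List.pyRange (q - 1) (-1) (-1)
  match PySem.List.index? players a with
  | some start =>
    match PySem.List.pyGet? players (PySem.Int.mod (pos + (start : Int)) q) with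
    | some v => v
    | none => 0                                -- unreachable: the index is always in range
  | none => 0                                  -- Python raises ValueError here; excluded by Pre_

-- ===== PRECONDITION & SPEC =====
-- Pre_: exactly the inputs on which A returns normally; on all others jogadores.index(a) raises ValueError.
def Pre_solve (q : Int) (f : Int) (a : Int) : Prop := 1 ≤ q ∧ 0 ≤ a ∧ a < q
instance (q : Int) (f : Int) (a : Int) : Decidable (Pre_solve q f a) := by unfold Pre_solve; infer_instance

def pvWitness_solve : Int × Int × Int := (5, 3, 2)

def Spec_solve (q : Int) (f : Int) (a : Int) (out : Int) : Prop := out = solve_alt q f a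
instance (q : Int) (f : Int) (a : Int) (out : Int) : Decidable (Spec_solve q f a out) := by unfold Spec_solve; infer_instance

-- ===== CLAIM (what is proved, stated in full; the proofs are below) =====
def Claim_equal_solve : Prop := ∀ (q : Int) (f : Int) (a : Int), Dom_solve q f a → Pre_solve q f a → Spec_solve q f a (solve q f a)

-- ===== LEMMAS AND PROOFS =====

-- the survivor's index in the rotated frame of a circle of size n, as a pure recurrence
def bfun : Nat → Int → Int
  | 0, _ => 0
  | 1, _ => 0
  | (n + 2), c =>
      if (bfun (n + 1) (c + 2) + c.emod ((n : Int) + 2) - 1).emod ((n : Int) + 1) < c.emod ((n : Int) + 2)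
      then (bfun (n + 1) (c + 2) + c.emod ((n : Int) + 2) - 1).emod ((n : Int) + 1)
      else (bfun (n + 1) (c + 2) + c.emod ((n : Int) + 2) - 1).emod ((n : Int) + 1) + 1

-- bridge: Int.emod is notation-level '%' (definitional)
theorem emod_eq_mod (a b : Int) : a.emod b = a % b := rfl

theorem emod_toNat (u j L : Nat) :
    (((u : Int) + (j : Int)).emod (L : Int)).toNat = (u + j) % L := by
  rw [emod_eq_mod, show ((u : Int) + (j : Int)) = (((u + j : Nat) : Nat) : Int) by push_cast; ring,
    ← Int.natCast_mod]
  exact Int.toNat_natCast _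

theorem clampIdx_eq_emod (n : Nat) (s : Int) (h1 : -1 ≤ s) (h2 : s < n) (hn : 1 ≤ n) :
    (PySem.List.clampIdx n s : Int) = s.emod n := by
  rw [emod_eq_mod]
  rcases le_or_gt 0 s with hs | hs
  · have hs' : s = (s.toNat : Int) := (Int.toNat_of_nonneg hs).symm
    rw [hs', PySem.List.clampIdx_natCast, Int.emod_eq_of_lt (by omega) (by omega)]
    simp [Nat.min_def]
    omega
  · have hs1 : s = -1 := by omega
    subst hs1
    rw [PySem.List.clampIdx_neg_one]
    have h3 : ((n : Int) - 1) % (n : Int) = (n : Int) - 1 := Int.emod_eq_of_lt (by omega) (by omega)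
    have h4 : (-1 : Int) % (n : Int) = ((n : Int) - 1) % (n : Int) := by
      rw [show (-1 : Int) = ((n : Int) - 1) - (n : Int) by ring, Int.sub_emod_right]
    rw [h4, h3]
    omega

-- rotated-list lookup: element x of (drop j ++ take j) is element (x+j) mod n of l
theorem rot_getElem (l : List Int) (j x : Nat) (hj : j ≤ l.length) (hx : x < l.length)
    (hlen : x < (l.drop j ++ l.take j).length) :
    (l.drop j ++ l.take j)[x] = l[(x + j) % l.length]'(Nat.mod_lt _ (by omega)) := by
  have hd : (l.drop j).length = l.length - j := by simp
  have ht : (l.take j).length = j := by simp [Nat.min_def]; omega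
  rw [List.getElem_append]
  split
  · next h =>
    rw [List.getElem_drop]
    congr 1
    rw [Nat.mod_eq_of_lt (by omega)]
    omega
  · next h =>
    rw [List.getElem_take]
    have h2 : (x + j) % l.length = x + j - l.length := by
      rw [Nat.mod_eq_sub_mod (by omega), Nat.mod_eq_of_lt (by omega)]
    congr 1
    omega

-- main loop characterisation: the survivor is l[(bfun n c + s mod n) mod n]
theorem solveLoop_eq (n : Nat) : ∀ (l : List Int) (s c : Int), l.length = n → 1 ≤ n →
    -1 ≤ s → s < n →
    solveLoop l s c = l.getD ((bfun n c + s.emod n).emod n).toNat 0 := by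
  induction n using Nat.strong_induction_on with
  | _ n ih =>
    intro l s c hl hn hs1 hs2
    rcases n with _ | n
    · omega
    rcases n with _ | m
    · -- n = 1
      rw [solveLoop]
      simp only [hl, if_pos]
      rw [PySem.List.pyGetD_zero]
      have h0 : ((bfun (0 + 1) c + s.emod ((0 + 1 : Nat) : Int)).emod ((0 + 1 : Nat) : Int)).toNat = 0 := by
        simp [bfun, emod_eq_mod]
      rw [h0]
    · -- n = m + 2
      have hl2 : l.length = m + 2 := by omega
      have hjl : (organizar_lista l s).length = m + 2 := by rw [organizar_lista_length]; omega
      have hmod : PySem.Int.mod c (((organizar_lista l s).length : Nat) : Int) =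
          c.emod ((m : Int) + 2) := by
        rw [PySem.Int.mod_eq_emod_of_pos (by rw [hjl]; push_cast; omega), hjl]
        push_cast
        rfl
      have he0 : 0 ≤ c.emod ((m : Int) + 2) := Int.emod_nonneg _ (by omega)
      have hen : c.emod ((m : Int) + 2) < (m : Int) + 2 := Int.emod_lt_of_pos c (by omega)
      have hpop : PySem.List.pop? (organizar_lista l s)
          (PySem.Int.mod c (((organizar_lista l s).length : Nat) : Int)) =
          some ((organizar_lista l s)[(c.emod ((m : Int) + 2)).toNat]'(by omega),
                (organizar_lista l s).eraseIdx (c.emod ((m : Int) + 2)).toNat) := by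
        rw [hmod]
        conv_lhs => rw [show c.emod ((m : Int) + 2) = (((c.emod ((m : Int) + 2)).toNat : Nat) : Int)
          from (Int.toNat_of_nonneg he0).symm]
        exact PySem.List.pop?_natCast _ _ (by omega)
      rw [solveLoop, if_neg (by omega)]
      split
      · next r heq =>
        rw [hpop] at heq
        injection heq with heq
        subst heq
        rw [hmod]
        -- recursive call: list of length m+1, start e-1, chutes c+2
        have hrl : ((organizar_lista l s).eraseIdx (c.emod ((m : Int) + 2)).toNat).length = m + 1 := by
          rw [List.length_eraseIdx_of_lt (by omega)]
          omega
        rw [ih (m + 1) (by omega) _ _ _ hrl (by omega) (by omega) (by push_cast; omega)]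
        set e : Int := c.emod ((m : Int) + 2) with he
        set y : Int := (bfun (m + 1) (c + 2) + e - 1).emod ((m : Int) + 1) with hy
        have hy0 : 0 ≤ y := Int.emod_nonneg _ (by omega)
        have hyn : y < (m : Int) + 1 := Int.emod_lt_of_pos _ (by omega)
        have hy' : (bfun (m + 1) (c + 2) + (e - 1).emod (((m + 1 : Nat) : Nat) : Int)).emod (((m + 1 : Nat) : Nat) : Int) = y := by
          rw [hy]
          simp only [emod_eq_mod]
          push_cast
          conv_lhs => rw [Int.add_emod, Int.emod_emod_of_dvd _ dvd_rfl, ← Int.add_emod]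
          congr 1
          ring
        rw [hy']
        set x : Int := if y < e then y else y + 1 with hx
        have hx0 : 0 ≤ x := by rw [hx]; split <;> omega
        have hxn : x < (m : Int) + 2 := by rw [hx]; split <;> omega
        have hbfun : bfun (m + 1 + 1) c = x := by
          show bfun (m + 2) c = x
          rw [bfun, hx, ← he, ← hy]
        -- relate rotated-list lookups to l lookups
        have hjle : PySem.List.clampIdx l.length s ≤ l.length := PySem.List.clampIdx_le _ _
        have hjval : ((PySem.List.clampIdx l.length s : Nat) : Int) = s.emod (((m + 1 + 1 : Nat) : Nat) : Int) := by
          rw [clampIdx_eq_emod l.length s hs1 (by rw [hl2]; push_cast at hs2 ⊢; omega) (by omega), hl]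
        have hjogdef : organizar_lista l s =
            l.drop (PySem.List.clampIdx l.length s) ++ l.take (PySem.List.clampIdx l.length s) := by
          have htake : PySem.List.slice l none (some s) = l.take (PySem.List.clampIdx l.length s) := by
            simp [PySem.List.slice]
          rw [organizar_lista, PySem.List.slice_some_none, htake]
        have hget : ∀ (t : Nat) (ht : t < l.length),
            (organizar_lista l s)[t]'(by omega) =
              l[(t + PySem.List.clampIdx l.length s) % l.length]'(Nat.mod_lt _ (by omega)) := by
          intro t ht
          have := rot_getElem l (PySem.List.clampIdx l.length s) t hjle ht (by rw [← hjogdef]; omega)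
          simp_rw [hjogdef]
          exact this
        -- the right-hand index, as a Nat-mod rotation
        have hT : ((bfun (m + 1 + 1) c + s.emod (((m + 1 + 1 : Nat) : Nat) : Int)).emod (((m + 1 + 1 : Nat) : Nat) : Int)).toNat =
            (x.toNat + PySem.List.clampIdx l.length s) % l.length := by
          rw [hbfun, ← hjval,
            show x = ((x.toNat : Nat) : Int) from (Int.toNat_of_nonneg hx0).symm,
            emod_toNat _ _ _, hl, Int.toNat_natCast]
        -- LHS: getD on the erased list
        have hyt : y.toNat < ((organizar_lista l s).eraseIdx e.toNat).length := by omega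
        rw [List.getD_eq_getElem _ _ hyt, List.getElem_eraseIdx, hT,
          List.getD_eq_getElem _ _ (Nat.mod_lt _ (by omega))]
        split
        · next hlt =>
          have hxy : x = y := by rw [hx, if_pos (by omega)]
          rw [hget y.toNat (by omega)]
          congr 2
          omega
        · next hge =>
          have hxy : x = y + 1 := by rw [hx, if_neg (by omega)]
          rw [hget (y.toNat + 1) (by omega)]
          congr 2
          omega
      · next heq =>
        rw [hpop] at heq
        simp at heq

-- the reversed range list is [q-1, q-2, …, 0]
theorem jog_eq (q : Int) :
    (PySem.List.pyRange 0 q 1).reverse = (List.range q.toNat).map (fun k : Nat => q - 1 - (k : Int)) := by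
  have h1 := PySem.List.pyRange_neg_one_eq_reverse (q - 1) (-1)
  rw [show (-1 : Int) + 1 = 0 by ring, show (q - 1 + 1 : Int) = q by ring] at h1
  rw [← h1, PySem.List.pyRange_neg_one, show (q - 1 - (-1) : Int) = q by ring]


-- B's fold over n = 2..m computes bfun m (2f + 2(q-m))
theorem fold_eq_bfun (q f : Int) (m : Nat) (hm : 1 ≤ m) :
    (PySem.List.pyRange 2 ((m : Int) + 1) 1).foldl
      (fun pos n =>
        let e := PySem.Int.mod (2 * f + 2 * (q - n)) n
        let y := PySem.Int.mod (pos + e - 1) (n - 1)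
        if y < e then y else y + 1) 0 = bfun m (2 * f + 2 * (q - m)) := by
  induction m, hm using Nat.le_induction with
  | base =>
    rw [show ((1 : Nat) : Int) + 1 = 2 by norm_num, PySem.List.pyRange_one_eq_nil (by norm_num)]
    simp [bfun]
  | succ n hn ih =>
    obtain ⟨k, rfl⟩ : ∃ k, n = k + 1 := ⟨n - 1, by omega⟩
    have hstep : PySem.List.pyRange 2 (((k + 1 + 1 : Nat) : Int) + 1) 1 =
        PySem.List.pyRange 2 (((k + 1 : Nat) : Int) + 1) 1 ++ [((k + 1 : Nat) : Int) + 1] := by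
      have := PySem.List.pyRange_one_succ_right (a := 2) (b := ((k + 1 : Nat) : Int) + 1) (by push_cast; omega)
      push_cast at this ⊢
      convert this using 3
    rw [hstep, List.foldl_append, ih]
    simp only [List.foldl_cons, List.foldl_nil]
    rw [show (k + 1 + 1 : Nat) = k + 2 from rfl, bfun]
    have m1 : PySem.Int.mod (2 * f + 2 * (q - (((k + 1 : Nat) : Int) + 1))) (((k + 1 : Nat) : Int) + 1) =
        (2 * f + 2 * (q - (((k + 1 : Nat) : Int) + 1))).emod (((k + 1 : Nat) : Int) + 1) :=
      PySem.Int.mod_eq_emod_of_pos (by push_cast; omega)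
    have m2 : ∀ z : Int, PySem.Int.mod z ((((k + 1 : Nat) : Int)) + 1 - 1) =
        z.emod ((((k + 1 : Nat) : Int)) + 1 - 1) := fun z =>
      PySem.Int.mod_eq_emod_of_pos (by push_cast; omega)
    simp only [m1, m2]
    have hbarg : bfun (k + 1) (2 * f + 2 * (q - ((k + 1 : Nat) : Int))) =
        bfun (k + 1) (2 * f + 2 * (q - ((k + 2 : Nat) : Int)) + 2) := by
      congr 1
      push_cast
      ring
    have hEB : (2 * f + 2 * (q - (((k + 1 : Nat) : Int) + 1))).emod (((k + 1 : Nat) : Int) + 1) =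
        (2 * f + 2 * (q - ((k + 2 : Nat) : Int))).emod ((k : Int) + 2) := by
      congr 1
    have hM : ((((k + 1 : Nat) : Int)) + 1 - 1) = ((k : Int) + 1) := by push_cast; ring
    rw [hbarg, hEB, hM]

-- index of a in the reversed range list
theorem index_jog (q a : Int) (hq : 1 ≤ q) (ha0 : 0 ≤ a) (haq : a < q) :
    PySem.List.index? ((List.range q.toNat).map (fun k : Nat => q - 1 - (k : Int))) a =
      some (q - 1 - a).toNat := by
  rw [PySem.List.index?_eq_some_iff]
  refine ⟨((List.range q.toNat).take (q - 1 - a).toNat).map (fun k : Nat => q - 1 - (k : Int)),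
          ((List.range q.toNat).drop ((q - 1 - a).toNat + 1)).map (fun k : Nat => q - 1 - (k : Int)),
          ?_, ?_, ?_⟩
  · have hlt : (q - 1 - a).toNat < (List.range q.toNat).length := by simp; omega
    have hsplit : List.range q.toNat =
        (List.range q.toNat).take (q - 1 - a).toNat ++
          (List.range q.toNat)[(q - 1 - a).toNat] :: (List.range q.toNat).drop ((q - 1 - a).toNat + 1) := by
      rw [List.getElem_cons_drop, List.take_append_drop]
    conv_lhs => rw [hsplit]
    rw [List.map_append, List.map_cons]
    congr 2
    rw [List.getElem_range]
    omega
  · simp [Nat.min_def]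
    omega
  · intro hmem
    rw [List.take_range, List.mem_map] at hmem
    obtain ⟨i, hi, hival⟩ := hmem
    rw [List.mem_range] at hi
    omega

-- ===== VERDICT (by name: the statement is the Claim_ definition above) =====
theorem solve_spec : Claim_equal_solve := by
  intro q f a _ hpre
  obtain ⟨hq, ha0, haq⟩ := hpre
  unfold Spec_solve
  have hNq : ((q.toNat : Nat) : Int) = q := Int.toNat_of_nonneg (by omega)
  have hN1 : 1 ≤ q.toNat := by omega
  have hk0 : (((q - 1 - a).toNat : Nat) : Int) = q - 1 - a := Int.toNat_of_nonneg (by omega)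
  -- A side
  have hsolve : solve q f a =
      solveLoop ((List.range q.toNat).map (fun k : Nat => q - 1 - (k : Int))) ((q - 1 - a).toNat : Int) (2 * f) := by
    rw [solve]
    simp only [jog_eq q, index_jog q a hq ha0 haq]
  have hlen : ((List.range q.toNat).map (fun k : Nat => q - 1 - (k : Int))).length = q.toNat := by simp
  rw [hsolve, solveLoop_eq q.toNat _ _ _ hlen hN1 (by omega) (by omega)]
  have hinner : (((q - 1 - a).toNat : Nat) : Int).emod ((q.toNat : Nat) : Int) = q - 1 - a := by
    rw [emod_eq_mod, Int.emod_eq_of_lt (by omega) (by omega), hk0]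
  rw [hinner, hNq]
  -- the common index
  have hX0 : 0 ≤ (bfun q.toNat (2 * f) + (q - 1 - a)).emod q := Int.emod_nonneg _ (by omega)
  have hXq : (bfun q.toNat (2 * f) + (q - 1 - a)).emod q < q := Int.emod_lt_of_pos _ (by omega)
  have hTlt : ((bfun q.toNat (2 * f) + (q - 1 - a)).emod q).toNat < q.toNat := by omega
  rw [List.getD_eq_getElem _ _ (by simpa using hTlt), List.getElem_map, List.getElem_range]
  -- B side
  have hfold := fold_eq_bfun q f q.toNat hN1
  rw [show 2 * f + 2 * (q - ((q.toNat : Nat) : Int)) = 2 * f by omega, show ((q.toNat : Nat) : Int) + 1 = q + 1 by omega] at hfold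
  have hplayers : PySem.List.pyRange (q - 1) (-1) (-1) =
      (List.range q.toNat).map (fun k : Nat => q - 1 - (k : Int)) := by
    rw [PySem.List.pyRange_neg_one, show (q - 1 - (-1) : Int) = q by ring]
  rw [solve_alt]
  simp only [hfold, hplayers, index_jog q a hq ha0 haq]
  rw [PySem.Int.mod_eq_emod_of_pos (by omega), hk0]
  have hget := PySem.List.pyGet?_eq_some_getElem
    ((List.range q.toNat).map (fun k : Nat => q - 1 - (k : Int)))
    (i := (bfun q.toNat (2 * f) + (q - 1 - a)) % q)
    (by simp only [← emod_eq_mod]; omega) (by simp [← emod_eq_mod]; omega)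
  rw [hget, List.getElem_map, List.getElem_range]
  simp only [← emod_eq_mod]
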